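-- pv_equiv track=rewrite | github.com/PinochetLab/truth-table-match-find-algorithm | rand_finder.py | _dfs
-- ===== SOURCE A (Python) =====
-- def _dfs(d, index, values1, values2):
--     if index >= len(d):
--         return True
--     _p, ps = d[index]
--     i1, i2 = _p
--     for v1, v2 in ps:
--         if i1 in values1 and v1 != values1[i1]:
--             continue
--         if i2 in values2 and v2 != values2[i2]:
--             continue
--         _values1 = dict(values1)
--         _values2 = dict(values2)
--         _values1[i1] = v1
--         _values2[i2] = v2
--
--         if _dfs(d, index + 1, _values1, _values2):
--             values1.clear()
--             values1.update(_values1)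
--             values2.clear()
--             values2.update(_values2)
--             return True
--     return False
-- ===== SOURCE B (Python) =====
-- def _dfs(d, index, values1, values2):
--     # Iterative backtracking with an explicit stack of (idx, values-snapshot pair,
--     # untried candidates); mutates values1/values2 in place on success, like the original.
--     n = len(d)
--     if index >= n:
--         return True
--     stack = [(index, dict(values1), dict(values2), list(d[index][1]))]
--     while stack:
--         idx, v1s, v2s, rest = stack.pop()
--         (i1, i2), _ = d[idx]
--         while rest:
--             a, b = rest.pop(0)
--             if (i1 not in v1s or a == v1s[i1]) and (i2 not in v2s or b == v2s[i2]):
--                 nv1 = dict(v1s)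
--                 nv1[i1] = a
--                 nv2 = dict(v2s)
--                 nv2[i2] = b
--                 if idx + 1 >= n:
--                     values1.clear()
--                     values1.update(nv1)
--                     values2.clear()
--                     values2.update(nv2)
--                     return True
--                 stack.append((idx, v1s, v2s, rest))
--                 stack.append((idx + 1, nv1, nv2, list(d[idx + 1][1])))
--                 break
--     return False
-- ===== Notes on version B (the rewrite author's own statement) =====
-- stated objective: alternative
-- what changed: Replaces A's recursive DFS (candidate loop + recursion into the next constraint) by an iterative backtracking search over an explicit stack of frames (index, values snapshots, untried candidates), popping a frame when its candidates are exhausted and pushing a new frame on the first consistent candidate.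
import Mathlib
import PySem

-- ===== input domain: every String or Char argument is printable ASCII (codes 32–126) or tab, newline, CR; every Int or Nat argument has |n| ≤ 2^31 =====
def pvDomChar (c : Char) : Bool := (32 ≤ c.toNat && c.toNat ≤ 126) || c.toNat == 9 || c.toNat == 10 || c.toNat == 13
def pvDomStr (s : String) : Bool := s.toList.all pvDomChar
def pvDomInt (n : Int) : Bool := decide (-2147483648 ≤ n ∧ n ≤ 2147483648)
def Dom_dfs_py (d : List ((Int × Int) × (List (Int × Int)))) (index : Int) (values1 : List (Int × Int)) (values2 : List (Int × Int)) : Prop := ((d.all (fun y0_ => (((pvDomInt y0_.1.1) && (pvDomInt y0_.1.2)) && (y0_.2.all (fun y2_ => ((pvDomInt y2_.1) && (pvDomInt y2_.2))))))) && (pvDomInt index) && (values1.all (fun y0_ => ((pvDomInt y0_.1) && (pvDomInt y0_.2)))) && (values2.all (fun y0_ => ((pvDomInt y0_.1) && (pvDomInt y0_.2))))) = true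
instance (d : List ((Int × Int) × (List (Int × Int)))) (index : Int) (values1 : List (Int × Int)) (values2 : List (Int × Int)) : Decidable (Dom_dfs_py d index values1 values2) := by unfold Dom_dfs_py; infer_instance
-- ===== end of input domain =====

-- B replaces A's recursive DFS by an iterative backtracking search over an explicit
-- stack of frames (objective: alternative decomposition, same exponential cost).
-- Both versions mutate the caller's dicts in place on success (identically);
-- the equivalence proved here is about the RETURN value only.

-- ===== PORT A =====
-- A's inner 'for v1, v2 in ps' loop: recursion over ps; the recursive _dfs call is the
-- continuation 'rec'.
def dfsTryA (i1 i2 : Int) (v1 v2 : PySem.Dict Int Int)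
    (rec : PySem.Dict Int Int → PySem.Dict Int Int → Bool) : List (Int × Int) → Bool
  | [] => false
  | (a, b) :: rest =>
    if (match v1.get? i1 with | some x => a != x | none => false) then
      dfsTryA i1 i2 v1 v2 rec rest       -- continue (i1 in values1 and v1 != values1[i1])
    else if (match v2.get? i2 with | some x => b != x | none => false) then
      dfsTryA i1 i2 v1 v2 rec rest       -- continue
    else if rec (v1.insert i1 a) (v2.insert i2 b) then true
    else dfsTryA i1 i2 v1 v2 rec rest

-- the recursive _dfs itself (on dicts); d[index] may raise in Python: none ↦ false (outside Pre_)
def dfsA (d : List ((Int × Int) × (List (Int × Int)))) (index : Int)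
    (v1 v2 : PySem.Dict Int Int) : Bool :=
  if _h : (d.length : Int) ≤ index then true
  else
    match PySem.List.pyGet? d index with
    | none => false
    | some ((i1, i2), ps) => dfsTryA i1 i2 v1 v2 (fun a b => dfsA d (index + 1) a b) ps
termination_by ((d.length : Int) - index).toNat
decreasing_by omega

def dfs_py (d : List ((Int × Int) × (List (Int × Int)))) (index : Int) (values1 : List (Int × Int)) (values2 : List (Int × Int)) : Bool :=
  dfsA d index (PySem.Dict.ofList values1) (PySem.Dict.ofList values2)

-- ===== PORT B =====
-- Source B's inner 'while rest: a, b = rest.pop(0) …' : scan to the first consistent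
-- candidate, returning it and the untried remainder (none = exhausted).
def scanB (i1 i2 : Int) (v1 v2 : PySem.Dict Int Int) :
    List (Int × Int) → Option (List (Int × Int) × Int × Int)
  | [] => none
  | (a, b) :: rest =>
    if ((match v1.get? i1 with | some x => a == x | none => true) &&
        (match v2.get? i2 with | some x => b == x | none => true)) then
      some (rest, a, b)
    else scanB i1 i2 v1 v2 rest

theorem scanB_some_length {i1 i2 : Int} {v1 v2 : PySem.Dict Int Int}
    {rest rest' : List (Int × Int)} {a b : Int}
    (h : scanB i1 i2 v1 v2 rest = some (rest', a, b)) : rest'.length < rest.length := by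
  induction rest with
  | nil => simp [scanB] at h
  | cons p t ih =>
    obtain ⟨pa, pb⟩ := p
    unfold scanB at h
    by_cases hc : (((match v1.get? i1 with | some x => pa == x | none => true) &&
        (match v2.get? i2 with | some x => pb == x | none => true)) = true)
    · rw [if_pos hc] at h
      simp only [Option.some.injEq, Prod.mk.injEq] at h
      obtain ⟨h1, -, -⟩ := h
      rw [← h1]; simp
    · rw [if_neg hc] at h
      have := ih h; simp; omega

-- termination potential: W d i bounds (by a margin) the work of a frame at level i
def potW (d : List ((Int × Int) × (List (Int × Int)))) (i : Int) : Nat :=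
  if _h : (d.length : Int) ≤ i then 2
  else
    match PySem.List.pyGet? d i with
    | none => 2
    | some (_, ps) => ps.length * potW d (i + 1) + 2
termination_by ((d.length : Int) - i).toNat
decreasing_by omega

theorem potW_eq {d : List ((Int × Int) × (List (Int × Int)))} {i : Int}
    (h : ¬ (d.length : Int) ≤ i) {p : Int × Int} {ps : List (Int × Int)}
    (hg : PySem.List.pyGet? d i = some (p, ps)) :
    potW d i = ps.length * potW d (i + 1) + 2 := by
  rw [potW]; rw [dif_neg h, hg]

-- d[i] succeeded, so i < len(d) (needed for the termination measure)
theorem pyGet?_some_lt {d : List ((Int × Int) × (List (Int × Int)))} {i : Int}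
    {x : (Int × Int) × List (Int × Int)} (hg : PySem.List.pyGet? d i = some x) :
    i < (d.length : Int) := by
  have hin : PySem.Raise.InRange d.length i := by
    by_contra hc
    rw [(PySem.List.pyGet?_eq_none_iff _ _).mpr hc] at hg
    simp at hg
  unfold PySem.Raise.InRange at hin
  omega

-- measure of one stack frame
def frameW (d : List ((Int × Int) × (List (Int × Int))))
    (f : Int × PySem.Dict Int Int × PySem.Dict Int Int × List (Int × Int)) : Nat :=
  f.2.2.2.length * potW d (f.1 + 1) + 1

-- Source B's outer 'while stack' loop
def bLoop (d : List ((Int × Int) × (List (Int × Int)))) :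
    List (Int × PySem.Dict Int Int × PySem.Dict Int Int × List (Int × Int)) → Bool
  | [] => false
  | (idx, v1s, v2s, rest) :: stk =>
    match PySem.List.pyGet? d idx with
    | none => false
    | some ((i1, i2), _) =>
      match hs : scanB i1 i2 v1s v2s rest with
      | none => bLoop d stk                      -- candidates exhausted: backtrack
      | some (rest', a, b) =>
        if (d.length : Int) ≤ idx + 1 then true  -- full assignment found
        else
          match hg2 : PySem.List.pyGet? d (idx + 1) with
          | none => false
          | some (_, ps') =>
            bLoop d ((idx + 1, v1s.insert i1 a, v2s.insert i2 b, ps') ::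
                     (idx, v1s, v2s, rest') :: stk)
termination_by stack => (stack.map (frameW d)).sum
decreasing_by
  · simp [frameW]
  · have hle : ¬ (d.length : Int) ≤ idx + 1 := not_le.mpr (pyGet?_some_lt hg2)
    have hlen := scanB_some_length hs
    have hW := potW_eq hle hg2
    simp only [List.map_cons, List.sum_cons, frameW]
    have h1 : ps'.length * potW d (idx + 1 + 1) + 1 = potW d (idx + 1) - 1 := by omega
    have h2 : potW d (idx + 1) ≥ 2 := by omega
    have h3 : (rest'.length + 1) * potW d (idx + 1) ≤ rest.length * potW d (idx + 1) :=
      Nat.mul_le_mul_right _ (by omega)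
    have h4 : (rest'.length + 1) * potW d (idx + 1)
        = rest'.length * potW d (idx + 1) + potW d (idx + 1) := by ring
    omega

def dfs_py_alt (d : List ((Int × Int) × (List (Int × Int)))) (index : Int) (values1 : List (Int × Int)) (values2 : List (Int × Int)) : Bool :=
  if (d.length : Int) ≤ index then true
  else
    match PySem.List.pyGet? d index with
    | none => false
    | some (_, ps) =>
      bLoop d [(index, PySem.Dict.ofList values1, PySem.Dict.ofList values2, ps)]

-- ===== PRECONDITION & SPEC =====
-- Pre_ excludes exactly the inputs on which Python's _dfs raises IndexError:
-- an initial index below -len(d) (d[index] out of range).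
def Pre_dfs_py (d : List ((Int × Int) × (List (Int × Int)))) (index : Int) (values1 : List (Int × Int)) (values2 : List (Int × Int)) : Prop :=
  -(d.length : Int) ≤ index
instance (d : List ((Int × Int) × (List (Int × Int)))) (index : Int) (values1 : List (Int × Int)) (values2 : List (Int × Int)) : Decidable (Pre_dfs_py d index values1 values2) := by unfold Pre_dfs_py; infer_instance

def pvWitness_dfs_py : (List ((Int × Int) × (List (Int × Int)))) × Int × (List (Int × Int)) × (List (Int × Int)) :=
  ([((0, 1), [(5, 7), (6, 8)]), ((0, 2), [(5, 9)])], 0, [(3, 4)], [])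

def Spec_dfs_py (d : List ((Int × Int) × (List (Int × Int)))) (index : Int) (values1 : List (Int × Int)) (values2 : List (Int × Int)) (out : Bool) : Prop := out = dfs_py_alt d index values1 values2
instance (d : List ((Int × Int) × (List (Int × Int)))) (index : Int) (values1 : List (Int × Int)) (values2 : List (Int × Int)) (out : Bool) : Decidable (Spec_dfs_py d index values1 values2 out) := by unfold Spec_dfs_py; infer_instance

-- ===== CLAIM (what is proved, stated in full; the proofs are below) =====
def Claim_equal_dfs_py : Prop := ∀ (d : List ((Int × Int) × (List (Int × Int)))) (index : Int) (values1 : List (Int × Int)) (values2 : List (Int × Int)), Dom_dfs_py d index values1 values2 → Pre_dfs_py d index values1 values2 → Spec_dfs_py d index values1 values2 (dfs_py d index values1 values2)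

-- ===== LEMMAS AND PROOFS =====

-- the consistency test both ports apply to a candidate (a, b)
def okB (i1 i2 : Int) (v1 v2 : PySem.Dict Int Int) (a b : Int) : Bool :=
  ((match v1.get? i1 with | some x => a == x | none => true) &&
   (match v2.get? i2 with | some x => b == x | none => true))

theorem scanB_cons (i1 i2 : Int) (v1 v2 : PySem.Dict Int Int) (a b : Int)
    (t : List (Int × Int)) :
    scanB i1 i2 v1 v2 ((a, b) :: t) =
      if okB i1 i2 v1 v2 a b then some (t, a, b) else scanB i1 i2 v1 v2 t := rfl

theorem tryA_cons (i1 i2 : Int) (v1 v2 : PySem.Dict Int Int)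
    (rec : PySem.Dict Int Int → PySem.Dict Int Int → Bool) (a b : Int)
    (t : List (Int × Int)) :
    dfsTryA i1 i2 v1 v2 rec ((a, b) :: t) =
      if okB i1 i2 v1 v2 a b then
        (if rec (v1.insert i1 a) (v2.insert i2 b) then true
         else dfsTryA i1 i2 v1 v2 rec t)
      else dfsTryA i1 i2 v1 v2 rec t := by
  unfold okB
  rcases hv1 : v1.get? i1 with _ | x <;> rcases hv2 : v2.get? i2 with _ | y <;>
    simp only [dfsTryA, hv1, hv2] <;> split_ifs <;> first | rfl | simp_all

-- a frame whose candidates scan to nothing corresponds to A's loop falling through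
theorem scanB_none_tryA {i1 i2 : Int} {v1 v2 : PySem.Dict Int Int}
    {rest : List (Int × Int)} (rec : PySem.Dict Int Int → PySem.Dict Int Int → Bool)
    (h : scanB i1 i2 v1 v2 rest = none) : dfsTryA i1 i2 v1 v2 rec rest = false := by
  induction rest with
  | nil => simp [dfsTryA]
  | cons p t ih =>
    obtain ⟨pa, pb⟩ := p
    rw [scanB_cons] at h
    rw [tryA_cons]
    by_cases hok : okB i1 i2 v1 v2 pa pb = true
    · rw [if_pos hok] at h; exact absurd h (by simp)
    · rw [if_neg hok] at h
      rw [if_neg hok]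
      exact ih h

-- scan finds the first consistent candidate: A's loop reaches exactly that candidate
theorem scanB_some_tryA {i1 i2 : Int} {v1 v2 : PySem.Dict Int Int}
    {rest rest' : List (Int × Int)} {a b : Int}
    (rec : PySem.Dict Int Int → PySem.Dict Int Int → Bool)
    (h : scanB i1 i2 v1 v2 rest = some (rest', a, b)) :
    dfsTryA i1 i2 v1 v2 rec rest =
      (if rec (v1.insert i1 a) (v2.insert i2 b) then true
       else dfsTryA i1 i2 v1 v2 rec rest') := by
  induction rest with
  | nil => simp [scanB] at h
  | cons p t ih =>
    obtain ⟨pa, pb⟩ := p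
    rw [scanB_cons] at h
    rw [tryA_cons]
    by_cases hok : okB i1 i2 v1 v2 pa pb = true
    · rw [if_pos hok] at h
      simp only [Option.some.injEq, Prod.mk.injEq] at h
      obtain ⟨h1, h2, h3⟩ := h
      subst h1; subst h2; subst h3
      rw [if_pos hok]
    · rw [if_neg hok] at h
      rw [if_neg hok]
      exact ih h

theorem pyGet?_succ_some {d : List ((Int × Int) × (List (Int × Int)))} {i : Int}
    {x : (Int × Int) × List (Int × Int)}
    (hg : PySem.List.pyGet? d i = some x) (hlt : i + 1 < (d.length : Int)) :
    ∃ y, PySem.List.pyGet? d (i + 1) = some y := by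
  have hin : PySem.Raise.InRange d.length i := by
    by_contra hc
    rw [(PySem.List.pyGet?_eq_none_iff _ _).mpr hc] at hg
    simp at hg
  rcases h2 : PySem.List.pyGet? d (i + 1) with _ | y
  · exfalso
    have := (PySem.List.pyGet?_eq_none_iff _ _).mp h2
    unfold PySem.Raise.InRange at this hin
    omega
  · exact ⟨y, rfl⟩

-- the key simulation: running the stack machine on a top frame (idx, v1, v2, rest)
-- equals A's candidate loop from 'rest', falling back to the rest of the stack.
theorem bLoop_cons (d : List ((Int × Int) × (List (Int × Int)))) :
    ∀ (N : Nat) (idx : Int) (v1 v2 : PySem.Dict Int Int) (rest : List (Int × Int))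
      (stk : List (Int × PySem.Dict Int Int × PySem.Dict Int Int × List (Int × Int)))
      (i1 i2 : Int) (ps0 : List (Int × Int)),
      ((((idx, v1, v2, rest) :: stk).map (frameW d)).sum ≤ N) →
      PySem.List.pyGet? d idx = some ((i1, i2), ps0) →
      bLoop d ((idx, v1, v2, rest) :: stk) =
        (if dfsTryA i1 i2 v1 v2 (fun a b => dfsA d (idx + 1) a b) rest then true
         else bLoop d stk) := by
  intro N
  induction N using Nat.strong_induction_on with
  | _ N IH =>
    intro idx v1 v2 rest stk i1 i2 ps0 hN hg
    rw [bLoop]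
    simp only [hg]
    rcases hs : scanB i1 i2 v1 v2 rest with _ | ⟨rest', a, b⟩
    · rw [scanB_none_tryA _ hs]
      simp
    · have hlen := scanB_some_length hs
      dsimp only
      rw [scanB_some_tryA _ hs]
      by_cases hle : (d.length : Int) ≤ idx + 1
      · rw [if_pos hle]
        have hA : dfsA d (idx + 1) (v1.insert i1 a) (v2.insert i2 b) = true := by
          rw [dfsA, dif_pos hle]
        simp [hA]
      · rw [if_neg hle]
        rcases hg2 : PySem.List.pyGet? d (idx + 1) with _ | ⟨⟨i1', i2'⟩, ps'⟩
        · obtain ⟨y, hy⟩ := pyGet?_succ_some hg (by omega)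
          rw [hg2] at hy
          exact absurd hy (by simp)
        dsimp only
        have hA : dfsA d (idx + 1) (v1.insert i1 a) (v2.insert i2 b)
            = dfsTryA i1' i2' (v1.insert i1 a) (v2.insert i2 b)
                (fun x y => dfsA d (idx + 1 + 1) x y) ps' := by
          rw [dfsA, dif_neg hle, hg2]
        -- measure bookkeeping for the two IH applications
        have hW := potW_eq hle hg2
        have hfr2 : frameW d (idx + 1, v1.insert i1 a, v2.insert i2 b, ps')
            + frameW d (idx, v1, v2, rest') < frameW d (idx, v1, v2, rest) := by
          simp only [frameW]
          have h2 : potW d (idx + 1) ≥ 2 := by omega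
          have h3 := Nat.mul_le_mul_right (potW d (idx + 1))
            (show rest'.length + 1 ≤ rest.length by omega)
          have h4 : (rest'.length + 1) * potW d (idx + 1)
              = rest'.length * potW d (idx + 1) + potW d (idx + 1) := by ring
          omega
        simp only [List.map_cons, List.sum_cons] at hN
        have hstep := IH (N - 1) (by omega) (idx + 1) (v1.insert i1 a) (v2.insert i2 b)
          ps' ((idx, v1, v2, rest') :: stk) i1' i2' ps'
          (by simp only [List.map_cons, List.sum_cons]; omega) hg2
        rw [hstep, hA]
        rcases hb : dfsTryA i1' i2' (v1.insert i1 a) (v2.insert i2 b)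
            (fun x y => dfsA d (idx + 1 + 1) x y) ps' with _ | _
        · rw [if_neg (by simp)]
          exact IH (N - 1) (by omega) idx v1 v2 rest' stk i1 i2 ps0
            (by simp only [List.map_cons, List.sum_cons]; omega) hg
        · rw [if_pos (by simp)]
          simp

-- ===== VERDICT (by name: the statement is the Claim_ definition above) =====
theorem dfs_py_spec : Claim_equal_dfs_py := by
  intro d index values1 values2 _hdom _hpre
  unfold Spec_dfs_py dfs_py dfs_py_alt
  by_cases hle : (d.length : Int) ≤ index
  · rw [if_pos hle, dfsA, dif_pos hle]
  · rw [if_neg hle]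
    rcases hg : PySem.List.pyGet? d index with _ | ⟨⟨⟨i1, i2⟩, ps⟩⟩
    · rw [dfsA, dif_neg hle]
      simp only [hg]
    · rw [dfsA, dif_neg hle]
      simp only [hg]
      rw [bLoop_cons d _ index _ _ ps [] i1 i2 ps (Nat.le_refl _) hg]
      simp [bLoop]
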